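-- pv_equiv track=rewrite | github.com/marek-bauer/Graph-plotter | StringPreparation.py | abs_replace
-- ===== SOURCE A (Python) =====
-- def abs_replace(s):
--     res = s
--     i = 1
--     if s[0] == "|":
--         res = res.replace("|", "abs(", 1)
--         i = 4
--     while i < len(res):
--         if res[i] == "|":
--             if '0' <= res[i-1] <= '9' or res[i-1] == 'x' or res[i-1] == ')':
--                 res = res.replace("|", ")", 1)
--             else:
--                 res = res.replace("|", "abs(", 1)
--                 i += 3
--         i += 1
--     return res
-- ===== SOURCE B (Python) =====
-- def abs_replace(s):
--     out = []
--     for c in s: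
--         if c == "|":
--             prev = out[-1] if out else ""
--             if prev and ('0' <= prev <= '9' or prev == 'x' or prev == ')'):
--                 out.append(")")
--             else:
--                 out.append("abs(")
--         else:
--             out.append(c)
--     return "".join(out)
-- ===== Notes on version B (the rewrite author's own statement) =====
-- stated objective: faster
-- what changed: Replaced the repeated res.replace(...,1) first-occurrence full-string scans with a single left-to-right pass that appends to an output buffer and decides each pipe delimiter by the last output character.
import Mathlib
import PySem

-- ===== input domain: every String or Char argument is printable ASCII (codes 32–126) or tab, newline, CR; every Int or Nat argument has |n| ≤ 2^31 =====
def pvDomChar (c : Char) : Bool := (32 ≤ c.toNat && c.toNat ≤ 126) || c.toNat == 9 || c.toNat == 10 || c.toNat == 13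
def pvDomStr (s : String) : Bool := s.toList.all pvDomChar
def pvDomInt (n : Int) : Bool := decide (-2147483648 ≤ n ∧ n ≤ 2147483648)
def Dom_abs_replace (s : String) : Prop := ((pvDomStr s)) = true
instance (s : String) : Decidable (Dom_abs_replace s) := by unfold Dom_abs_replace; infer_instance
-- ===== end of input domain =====

-- B is a single left-to-right pass over the string appending to an output buffer,
-- deciding each pipe delimiter by the last output character, instead of A's repeated first-
-- occurrence replace scans; return-value equivalence on nonempty strings.


-- ===== PORT A =====
-- res.replace("|", rep, 1): replace the first occurrence of '|'
def replFirstBar (rep : List Char) : List Char → List Char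
  | [] => []
  | c :: cs => if c = '|' then rep ++ cs else c :: replFirstBar rep cs

-- used by absLoop's termination proof
theorem length_replFirstBar (rep : List Char) (l : List Char) (h : '|' ∈ l) :
    (replFirstBar rep l).length + 1 = l.length + rep.length := by
  induction l with
  | nil => cases h
  | cons c cs ih =>
    by_cases hc : c = '|'
    · simp [replFirstBar, hc]; omega
    · rcases List.mem_cons.mp h with h0 | h1
      · exact absurd h0.symm hc
      · simp [replFirstBar, hc]
        have := ih h1; omega

-- the while loop of A: res, i as in the Python
def absLoop (res : List Char) (i : Nat) : List Char :=
  if h : i < res.length then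
    if hb : res[i] = '|' then
      let p := res.getD (i - 1) ' '
      if ('0' ≤ p ∧ p ≤ '9') ∨ p = 'x' ∨ p = ')' then
        absLoop (replFirstBar [')'] res) (i + 1)
      else
        absLoop (replFirstBar ['a', 'b', 's', '('] res) (i + 4)
    else
      absLoop res (i + 1)
  else res
termination_by res.length - i
decreasing_by
  · have hm : '|' ∈ res := hb ▸ List.getElem_mem h
    have := length_replFirstBar [')'] res hm
    simp at this; omega
  · have hm : '|' ∈ res := hb ▸ List.getElem_mem h
    have := length_replFirstBar ['a', 'b', 's', '('] res hm
    simp at this; omega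
  · omega

def abs_replace (s : String) : String :=
  let cs := s.toList
  match PySem.List.pyGet? cs 0 with
  | none => s   -- Python raises IndexError here (empty string); excluded by Pre_
  | some c =>
    if c = '|' then String.ofList (absLoop (replFirstBar ['a', 'b', 's', '('] cs) 4)
    else String.ofList (absLoop cs 1)

-- ===== PORT B =====
-- loop body of Source B: append to the output buffer, deciding '|' by the last output char
def stepB (out : List Char) (c : Char) : List Char :=
  if c = '|' then
    match out.getLast? with
    | some p =>
      if ('0' ≤ p ∧ p ≤ '9') ∨ p = 'x' ∨ p = ')' then out ++ [')']
      else out ++ ['a', 'b', 's', '(']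
    | none => out ++ ['a', 'b', 's', '(']
  else out ++ [c]

def abs_replace_alt (s : String) : String :=
  String.ofList (s.toList.foldl stepB [])

-- ===== PRECONDITION & SPEC =====
-- Pre_ excludes only the empty string, on which A raises IndexError (s[0]).
def Pre_abs_replace (s : String) : Prop := s ≠ ""
instance (s : String) : Decidable (Pre_abs_replace s) := by unfold Pre_abs_replace; infer_instance
def pvWitness_abs_replace : String := "|x|+2*|-3|"

def Spec_abs_replace (s : String) (out : String) : Prop := out = abs_replace_alt s
instance (s : String) (out : String) : Decidable (Spec_abs_replace s out) := by unfold Spec_abs_replace; infer_instance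

-- ===== CLAIM (what is proved, stated in full; the proofs are below) =====
def Claim_equal_abs_replace : Prop := ∀ (s : String), Dom_abs_replace s → Pre_abs_replace s → Spec_abs_replace s (abs_replace s)

-- ===== LEMMAS AND PROOFS =====

theorem replFirstBar_append (rep o r : List Char) (h : '|' ∉ o) :
    replFirstBar rep (o ++ '|' :: r) = o ++ rep ++ r := by
  induction o with
  | nil => simp [replFirstBar]
  | cons c cs ih =>
    have hc : c ≠ '|' := fun hc => h (hc ▸ List.mem_cons_self)
    simp only [List.cons_append, replFirstBar, if_neg hc]
    rw [ih (fun hm => h (List.mem_cons_of_mem _ hm))]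

-- loop invariant: once the first i = o.length output characters are settled (no '|'
-- among them, o nonempty), A's loop computes B's fold over the remaining input
theorem absLoop_eq_foldl (r : List Char) : ∀ (o : List Char), o ≠ [] → '|' ∉ o →
    absLoop (o ++ r) o.length = List.foldl stepB o r := by
  induction r with
  | nil => intro o _ _; rw [absLoop]; simp
  | cons c r ih =>
    intro o ho hbar
    have hlt : o.length < (o ++ c :: r).length := by simp
    have hget : (o ++ c :: r)[o.length]'hlt = c := by
      rw [List.getElem_append_right (Nat.le_refl _)]; simp
    obtain ⟨p, hp⟩ : ∃ p, o.getLast? = some p := by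
      cases o with
      | nil => exact absurd rfl ho
      | cons a as => exact Option.isSome_iff_exists.mp (by simp)
    rw [absLoop, dif_pos hlt]
    simp only [hget]
    by_cases hc : c = '|'
    · -- the '|' case: first-occurrence replace happens exactly at position o.length
      subst hc
      have hgetD : (o ++ '|' :: r).getD (o.length - 1) ' ' = p := by
        rw [List.getD_eq_getElem?_getD, List.getElem?_append_left (by
          cases o with
          | nil => exact absurd rfl ho
          | cons a as => simp)]
        rw [← List.getLast?_eq_getElem?, hp]
        rfl
      rw [dif_pos rfl]
      simp only [hgetD]
      have hfold : List.foldl stepB o ('|' :: r) = List.foldl stepB (stepB o '|') r := rfl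
      rw [hfold]
      by_cases hcond : ('0' ≤ p ∧ p ≤ '9') ∨ p = 'x' ∨ p = ')'
      · rw [if_pos hcond, replFirstBar_append _ _ _ hbar]
        have hs : stepB o '|' = o ++ [')'] := by
          simp [stepB, hp, hcond]
        rw [hs]
        have hlen : o.length + 1 = (o ++ [')']).length := by simp
        rw [hlen]
        exact ih (o ++ [')']) (by simp) (by simp [hbar])
      · rw [if_neg hcond, replFirstBar_append _ _ _ hbar]
        have hs : stepB o '|' = o ++ ['a', 'b', 's', '('] := by
          simp [stepB, hp, hcond]
        rw [hs]
        have hlen : o.length + 4 = (o ++ ['a', 'b', 's', '(']).length := by simp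
        rw [hlen]
        exact ih (o ++ ['a', 'b', 's', '(']) (by simp) (by simp [hbar])
    · rw [dif_neg hc]
      have hfold : List.foldl stepB o (c :: r) = List.foldl stepB (o ++ [c]) r := by
        simp only [List.foldl_cons, stepB, if_neg hc]
      rw [hfold]
      have hre : o ++ c :: r = (o ++ [c]) ++ r := by simp
      have hlen : o.length + 1 = (o ++ [c]).length := by simp
      rw [hre, hlen]
      exact ih (o ++ [c]) (by simp) (by simp [hbar, eq_comm, hc])

theorem abs_replace_spec : Claim_equal_abs_replace := by
  intro s _ hpre
  unfold Spec_abs_replace abs_replace abs_replace_alt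
  have hs : s.toList ≠ [] := by
    intro h
    exact hpre (by rwa [← String.toList_eq_nil_iff])
  cases hcs : s.toList with
  | nil => exact absurd hcs hs
  | cons c cs =>
    have hg : PySem.List.pyGet? (c :: cs) 0 = some c := by simp [PySem.List.pyGet?, PySem.List.pyIdx?]
    simp only [hg]
    by_cases hc : c = '|'
    · subst hc
      have h1 : replFirstBar ['a', 'b', 's', '('] ('|' :: cs) = ['a', 'b', 's', '('] ++ cs := by
        simp [replFirstBar]
      have h4 : (4 : Nat) = (['a', 'b', 's', '(']).length := rfl
      rw [h1, h4, absLoop_eq_foldl cs _ (by simp) (by decide)]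
      rfl
    · rw [if_neg hc]
      have h1 : (1 : Nat) = ([c]).length := rfl
      have h2 : c :: cs = [c] ++ cs := rfl
      rw [h2, h1, absLoop_eq_foldl cs [c] (by simp) (by simp [eq_comm, hc])]
      simp [stepB, hc]
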